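-- pv_equiv track=rewrite | github.com/cgbsu/ReseachSpring2022SymbolicNotebooks0 | work/stairwell_symbolic_solution/1d/new_attempt/stateless.py | symbolicToIdentifier
-- ===== SOURCE A (Python) =====
-- def symbolicToIdentifier(symbolic):
--     identifier = str(symbolic)
--     replacementList = {
--             '{' : "OCB",
--             '}' : "CCB",
--             '(' : "OP",
--             ')' : "CP",
--             '[' : "OSB",
--             ']' : "CSB",
--             '-' : "N",
--             "Backslash" : "\\"
--         }
--     for toReplace, replacement in replacementList.items():
--         identifier = identifier.replace(toReplace, replacement)
--     return identifier
-- ===== SOURCE B (Python) =====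
-- def symbolicToIdentifier(symbolic):
--     # One simultaneous per-character translation for the seven bracket/minus
--     # keys, then a single final pass for the multi-character "Backslash" key.
--     table = str.maketrans({
--         '{': "OCB", '}': "CCB",
--         '(': "OP",  ')': "CP",
--         '[': "OSB", ']': "CSB",
--         '-': "N",
--     })
--     return str(symbolic).translate(table).replace("Backslash", "\\")
-- ===== Notes on version B (the rewrite author's own statement) =====
-- stated objective: idiomatic
-- what changed: Replaces the seven sequential full-string .replace scans for the single-character keys with one simultaneous str.translate pass over the string, followed by the single multi-character 'Backslash' replacement.
import Mathlib
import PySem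

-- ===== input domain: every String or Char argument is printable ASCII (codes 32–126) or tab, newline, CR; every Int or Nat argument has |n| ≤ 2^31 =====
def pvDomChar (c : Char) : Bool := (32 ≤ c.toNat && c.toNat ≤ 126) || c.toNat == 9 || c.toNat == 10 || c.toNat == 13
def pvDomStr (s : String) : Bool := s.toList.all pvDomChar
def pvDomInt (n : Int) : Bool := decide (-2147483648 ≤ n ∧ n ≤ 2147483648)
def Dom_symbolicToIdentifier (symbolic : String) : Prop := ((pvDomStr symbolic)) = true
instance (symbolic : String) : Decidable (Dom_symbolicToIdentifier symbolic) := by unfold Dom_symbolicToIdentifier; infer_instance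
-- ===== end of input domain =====

-- B replaces the seven sequential single-character .replace scans with one simultaneous
-- per-character translation pass, followed by the single "Backslash" replacement (idiomatic).

-- ===== PORT A =====
-- dict.items() of the replacement dict, in insertion order
def pvReplacementList : List (String × String) :=
  [("{", "OCB"), ("}", "CCB"), ("(", "OP"), (")", "CP"),
   ("[", "OSB"), ("]", "CSB"), ("-", "N"), ("Backslash", "\\")]

def symbolicToIdentifier (symbolic : String) : String :=
  let identifier := symbolic  -- str(symbolic): identity on a str argument
  pvReplacementList.foldl (fun identifier p => PySem.Str.replace identifier p.1 p.2) identifier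

-- ===== PORT B =====
-- the str.maketrans table of Source B, as a per-character function
def pvTable (c : Char) : List Char :=
  if c = '{' then ['O','C','B'] else if c = '}' then ['C','C','B']
  else if c = '(' then ['O','P'] else if c = ')' then ['C','P']
  else if c = '[' then ['O','S','B'] else if c = ']' then ['C','S','B']
  else if c = '-' then ['N'] else [c]

def symbolicToIdentifier_alt (symbolic : String) : String :=
  -- str(symbolic).translate(table), then .replace("Backslash", "\\")
  PySem.Str.replace (String.ofList (symbolic.toList.flatMap pvTable)) "Backslash" "\\"

-- ===== PRECONDITION & SPEC =====
def Spec_symbolicToIdentifier (symbolic : String) (out : String) : Prop := out = symbolicToIdentifier_alt symbolic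
instance (symbolic : String) (out : String) : Decidable (Spec_symbolicToIdentifier symbolic out) := by unfold Spec_symbolicToIdentifier; infer_instance

-- ===== CLAIM (what is proved, stated in full; the proofs are below) =====
def Claim_equal_symbolicToIdentifier : Prop := ∀ (symbolic : String), Dom_symbolicToIdentifier symbolic → Spec_symbolicToIdentifier symbolic (symbolicToIdentifier symbolic)

-- ===== LEMMAS AND PROOFS =====

-- A single-character str.replace is a flatMap over the characters.
theorem charReplace_go (c : Char) (v : List Char) (l : List Char) :
    ∀ (fuel : Nat) (acc : List Char), l.length ≤ fuel →
      PySem.Chars.replace.go [c] v fuel l acc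
        = acc.reverse ++ l.flatMap (fun x => if x = c then v else [x]) := by
  induction l with
  | nil =>
      intro fuel acc _
      cases fuel <;> simp [PySem.Chars.replace.go]
  | cons x t ih =>
      intro fuel acc h
      cases fuel with
      | zero => simp at h
      | succ m =>
        by_cases hx : x = c
        · subst hx
          simp only [PySem.Chars.replace.go, List.isPrefixOf, Bool.and_true,
            beq_self_eq_true, if_pos, List.length_cons, List.length_nil,
            List.drop_succ_cons, List.drop_zero]
          rw [ih m (v.reverse ++ acc) (by simpa using h)]
          simp
        · simp only [PySem.Chars.replace.go, List.isPrefixOf, Bool.and_true]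
          rw [if_neg (by simp [Ne.symm hx, beq_iff_eq]),
            ih m (x :: acc) (by simpa using Nat.le_of_succ_le_succ h)]
          simp [hx]

theorem charReplace (s : List Char) (c : Char) (v : List Char) :
    PySem.Chars.replace s [c] v = s.flatMap (fun x => if x = c then v else [x]) := by
  simp [PySem.Chars.replace, charReplace_go c v s s.length [] (le_refl _)]

-- Fusing a subsequent single-character replace into an existing per-character translation.
theorem charReplace_flatMap (s : List Char) (c : Char) (v : List Char)
    (F F' : Char → List Char)
    (h : ∀ x, (F x).flatMap (fun y => if y = c then v else [y]) = F' x) :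
    PySem.Chars.replace (s.flatMap F) [c] v = s.flatMap F' := by
  rw [charReplace, List.flatMap_assoc]
  exact List.flatMap_congr (fun x _ => h x)

-- The seven single-character replaces of A, applied in sequence, are B's one translation pass.
theorem seven_steps (s : List Char) :
    PySem.Chars.replace (PySem.Chars.replace (PySem.Chars.replace (PySem.Chars.replace
      (PySem.Chars.replace (PySem.Chars.replace (PySem.Chars.replace s
        ['{'] ['O','C','B']) ['}'] ['C','C','B']) ['('] ['O','P']) [')'] ['C','P'])
        ['['] ['O','S','B']) [']'] ['C','S','B']) ['-'] ['N']
      = s.flatMap pvTable := by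
  have h0 : s = s.flatMap (fun x => [x]) := (List.flatMap_singleton' s).symm
  conv_lhs => rw [h0]
  rw [charReplace_flatMap _ _ _ _ (fun x => if x = '{' then ['O','C','B'] else [x])
      (by intro x; simp),
    charReplace_flatMap _ _ _ _
      (fun x => if x = '{' then ['O','C','B'] else if x = '}' then ['C','C','B'] else [x])
      (by intro x; split_ifs <;> simp_all [List.flatMap_cons, List.flatMap_nil]),
    charReplace_flatMap _ _ _ _
      (fun x => if x = '{' then ['O','C','B'] else if x = '}' then ['C','C','B']
        else if x = '(' then ['O','P'] else [x])
      (by intro x; split_ifs <;> simp_all [List.flatMap_cons, List.flatMap_nil]),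
    charReplace_flatMap _ _ _ _
      (fun x => if x = '{' then ['O','C','B'] else if x = '}' then ['C','C','B']
        else if x = '(' then ['O','P'] else if x = ')' then ['C','P'] else [x])
      (by intro x; split_ifs <;> simp_all [List.flatMap_cons, List.flatMap_nil]),
    charReplace_flatMap _ _ _ _
      (fun x => if x = '{' then ['O','C','B'] else if x = '}' then ['C','C','B']
        else if x = '(' then ['O','P'] else if x = ')' then ['C','P']
        else if x = '[' then ['O','S','B'] else [x])
      (by intro x; split_ifs <;> simp_all [List.flatMap_cons, List.flatMap_nil]),
    charReplace_flatMap _ _ _ _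
      (fun x => if x = '{' then ['O','C','B'] else if x = '}' then ['C','C','B']
        else if x = '(' then ['O','P'] else if x = ')' then ['C','P']
        else if x = '[' then ['O','S','B'] else if x = ']' then ['C','S','B'] else [x])
      (by intro x; split_ifs <;> simp_all [List.flatMap_cons, List.flatMap_nil]),
    charReplace_flatMap _ _ _ _ pvTable
      (by intro x; simp only [pvTable]; split_ifs <;> simp_all [List.flatMap_cons, List.flatMap_nil])]

-- ===== VERDICT (by name: the statement is the Claim_ definition above) =====
theorem symbolicToIdentifier_spec : Claim_equal_symbolicToIdentifier := by
  intro symbolic _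
  show _ = _
  simp only [symbolicToIdentifier, symbolicToIdentifier_alt, pvReplacementList, List.foldl]
  simp only [PySem.Str.replace, String.toList_ofList]
  rw [show ("{" : String).toList = ['{'] from rfl, show ("OCB" : String).toList = ['O','C','B'] from rfl,
      show ("}" : String).toList = ['}'] from rfl, show ("CCB" : String).toList = ['C','C','B'] from rfl,
      show ("(" : String).toList = ['('] from rfl, show ("OP" : String).toList = ['O','P'] from rfl,
      show (")" : String).toList = [')'] from rfl, show ("CP" : String).toList = ['C','P'] from rfl,
      show ("[" : String).toList = ['['] from rfl, show ("OSB" : String).toList = ['O','S','B'] from rfl,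
      show ("]" : String).toList = [']'] from rfl, show ("CSB" : String).toList = ['C','S','B'] from rfl,
      show ("-" : String).toList = ['-'] from rfl, show ("N" : String).toList = ['N'] from rfl,
      seven_steps]
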